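-- pv_equiv track=rewrite | github.com/ramoncorominas/Rename-photos-by-EXIF | rename_photos.py | number_of_duplicates
-- ===== SOURCE A (Python) =====
-- def number_of_duplicates(renaming_dict):
--     """Check if there are any repeated destination names in the same directory"""
--     repeated_fnames = []
--     existing_fnames = []
--     all_fnames = [fn for fn in renaming_dict.values() if fn is not None]
--     for fn in all_fnames:
--         if fn in existing_fnames:
--             repeated_fnames.append(fn)
--         else:
--             existing_fnames.append(fn)
--     return len(repeated_fnames)
-- ===== SOURCE B (Python) =====
-- def number_of_duplicates(renaming_dict):
--     """Check if there are any repeated destination names in the same directory"""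
--     freq = {}
--     for fn in renaming_dict.values():
--         if fn is not None:
--             freq[fn] = freq.get(fn, 0) + 1
--     return sum(c - 1 for c in freq.values())
-- ===== Notes on version B (the rewrite author's own statement) =====
-- stated objective: faster
-- what changed: Replaces the seen/repeated accumulator lists and the per-element linear membership scan with a single frequency-table (dict) build followed by a closed-form sum of (count - 1) over the table's values.
import Mathlib
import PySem

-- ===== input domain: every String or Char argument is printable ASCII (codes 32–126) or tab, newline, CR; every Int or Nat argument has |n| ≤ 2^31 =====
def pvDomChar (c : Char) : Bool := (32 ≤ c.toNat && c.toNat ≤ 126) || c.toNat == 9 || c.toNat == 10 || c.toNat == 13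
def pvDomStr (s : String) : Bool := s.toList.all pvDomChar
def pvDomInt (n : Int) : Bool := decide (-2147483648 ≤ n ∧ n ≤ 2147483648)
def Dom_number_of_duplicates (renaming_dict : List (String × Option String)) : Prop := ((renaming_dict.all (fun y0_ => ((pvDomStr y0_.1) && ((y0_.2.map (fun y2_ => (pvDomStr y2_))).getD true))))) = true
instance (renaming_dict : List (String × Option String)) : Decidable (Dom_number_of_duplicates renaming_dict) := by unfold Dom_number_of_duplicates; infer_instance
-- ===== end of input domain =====

-- ===== PORT A =====
-- B replaces the seen/repeated lists and the per-element membership scan with a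
-- frequency table built in one pass plus a sum of (count - 1) (objective: faster, O(n^2) -> O(n)).
def number_of_duplicates (renaming_dict : List (String × Option String)) : Int :=
  let all_fnames : List String :=
    ((PySem.Dict.ofList renaming_dict).values).filterMap (fun fn => fn)
  let res : List String × List String :=
    all_fnames.foldl
      (fun (st : List String × List String) fn =>
        if fn ∈ st.2 then (st.1 ++ [fn], st.2) else (st.1, st.2 ++ [fn]))
      ([], [])
  (res.1.length : Int)

-- ===== PORT B =====
def number_of_duplicates_alt (renaming_dict : List (String × Option String)) : Int :=
  let freq : PySem.Dict String Int :=
    ((PySem.Dict.ofList renaming_dict).values).foldl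
      (fun d fn =>
        match fn with
        | none => d
        | some s => d.insert s (d.getD s 0 + 1))
      PySem.Dict.empty
  freq.values.foldl (fun acc c => acc + (c - 1)) 0

-- ===== PRECONDITION & SPEC =====
def Spec_number_of_duplicates (renaming_dict : List (String × Option String)) (out : Int) : Prop := out = number_of_duplicates_alt renaming_dict
instance (renaming_dict : List (String × Option String)) (out : Int) : Decidable (Spec_number_of_duplicates renaming_dict out) := by unfold Spec_number_of_duplicates; infer_instance

-- ===== CLAIM (what is proved, stated in full; the proofs are below) =====
def Claim_equal_number_of_duplicates : Prop := ∀ (renaming_dict : List (String × Option String)), Dom_number_of_duplicates renaming_dict → Spec_number_of_duplicates renaming_dict (number_of_duplicates renaming_dict)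

-- ===== LEMMAS AND PROOFS =====

-- The frequency-building loop over the option list equals the counter of the filtered list.
theorem freq_loop_eq_counter (l : List (Option String)) (d : PySem.Dict String Int) :
    l.foldl (fun d fn => match fn with
      | none => d
      | some s => d.insert s (d.getD s 0 + 1)) d
    = (l.filterMap (fun fn => fn)).foldl (fun d s => d.insert s (d.getD s 0 + 1)) d := by
  induction l generalizing d with
  | nil => rfl
  | cons x xs ih => cases x <;> simp [List.foldl_cons, ih]

-- A's loop: total growth of the two accumulators is the length of the input, and the
-- "seen" accumulator evolves exactly as PySem.Set.add.
theorem aloop_len (l : List String) (rep seen : List String) :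
    (l.foldl (fun (st : List String × List String) fn =>
        if fn ∈ st.2 then (st.1 ++ [fn], st.2) else (st.1, st.2 ++ [fn])) (rep, seen)).1.length
    + (l.foldl (fun (st : List String × List String) fn =>
        if fn ∈ st.2 then (st.1 ++ [fn], st.2) else (st.1, st.2 ++ [fn])) (rep, seen)).2.length
    = rep.length + seen.length + l.length := by
  induction l generalizing rep seen with
  | nil => simp
  | cons x xs ih =>
      simp only [List.foldl_cons]
      by_cases h : x ∈ seen <;> simp [h, ih] <;> omega

theorem aloop_snd (l : List String) (rep seen : List String) :
    (l.foldl (fun (st : List String × List String) fn =>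
        if fn ∈ st.2 then (st.1 ++ [fn], st.2) else (st.1, st.2 ++ [fn])) (rep, seen)).2
    = PySem.Set.update seen l := by
  induction l generalizing rep seen with
  | nil => simp [PySem.Set.update_nil]
  | cons x xs ih =>
      simp only [List.foldl_cons]
      rw [PySem.Set.update_cons]
      by_cases h : x ∈ seen <;> simp [ih, PySem.Set.add, h]

-- Indicator sum over a Nodup list.
theorem sum_indicator (S : List String) (x : String) (hS : S.Nodup) :
    (S.map (fun k => (if k = x then (1 : Int) else 0))).sum = if x ∈ S then 1 else 0 := by
  induction S with
  | nil => simp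
  | cons s ss ihs =>
      obtain ⟨hns, hss⟩ := List.nodup_cons.mp hS
      by_cases hsx : s = x
      · subst hsx
        have h0 : (ss.map (fun k => (if k = s then (1 : Int) else 0))).sum = 0 := by
          rw [ihs hss]; simp [hns]
        simp [h0]
      · have hxs : x ≠ s := fun h => hsx h.symm
        have hmem : (x ∈ s :: ss) = (x ∈ ss) := by simp [List.mem_cons, hxs]
        simp [hsx, ihs hss, hmem]

-- Summing counts of l over a Nodup list S gives the number of elements of l lying in S.
theorem sum_counts (l S : List String) (hS : S.Nodup) :
    (S.map (fun k => (l.count k : Int))).sum = ((l.filter (fun x => x ∈ S)).length : Int) := by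
  induction l with
  | nil => simp
  | cons x xs ih =>
      have hstep : (S.map (fun k => ((x :: xs).count k : Int))).sum
          = (S.map (fun k => (xs.count k : Int))).sum
            + (S.map (fun k => (if k = x then (1 : Int) else 0))).sum := by
        rw [← List.sum_map_add]
        apply congrArg List.sum
        apply List.map_congr_left
        intro k _
        by_cases hkx : k = x
        · simp [hkx]
        · have hxk : ¬ x = k := fun h => hkx h.symm
          simp [List.count_cons, hkx, hxk]
      rw [hstep, ih, sum_indicator S x hS]
      by_cases hx : x ∈ S <;> simp [hx] <;> omega

-- abbreviation shared by the two closed forms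
theorem b_closed (vals : List (Option String)) :
    (((vals.foldl (fun d fn => match fn with
        | none => d
        | some s => d.insert s (d.getD s 0 + 1)) PySem.Dict.empty) :
          PySem.Dict String Int).values).foldl (fun acc c => acc + (c - 1)) 0
    = ((vals.filterMap (fun fn => fn)).length : Int)
      - (((PySem.Set.ofList (vals.filterMap (fun fn => fn))) : List String).length : Int) := by
  rw [freq_loop_eq_counter]
  set l := vals.filterMap (fun fn => fn) with hl
  rw [PySem.Dict.foldl_insert_getD_add_one_eq_counter]
  have hvals : (PySem.Dict.counter l (κ := String)).values
      = (PySem.Set.ofList l).map (fun k => (l.count k : Int)) := by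
    show ((PySem.Dict.counter l (κ := String)).items).map (·.2)
        = (PySem.Set.ofList l).map (fun k => (l.count k : Int))
    rw [PySem.Dict.items_counter]
    simp [List.map_map, Function.comp]
  rw [hvals]
  have hfold : ∀ (L : List Int) (a : Int),
      L.foldl (fun acc c => acc + (c - 1)) a = a + L.sum - L.length := by
    intro L
    induction L with
    | nil => intro a; simp
    | cons c cs ihc => intro a; simp [List.foldl_cons, ihc]; ring
  rw [hfold]
  have hsum := sum_counts l (PySem.Set.ofList l) (PySem.Set.nodup_ofList l)
  have hfilt : l.filter (fun x => x ∈ PySem.Set.ofList l) = l := by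
    apply List.filter_eq_self.mpr
    intro a ha
    simp [PySem.Set.mem_ofList, ha]
  rw [hfilt] at hsum
  simp [hsum]

-- ===== VERDICT (by name: the statement is the Claim_ definition above) =====
theorem number_of_duplicates_spec : Claim_equal_number_of_duplicates := by
  intro rd _
  unfold Spec_number_of_duplicates
  set vals := (PySem.Dict.ofList rd).values with hv
  set l := vals.filterMap (fun fn => fn) with hl
  have keyA : number_of_duplicates rd
      = (l.length : Int) - ((PySem.Set.ofList l : List String).length : Int) := by
    show ((l.foldl (fun (st : List String × List String) fn =>
        if fn ∈ st.2 then (st.1 ++ [fn], st.2) else (st.1, st.2 ++ [fn])) ([], [])).1.length : Int)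
      = (l.length : Int) - ((PySem.Set.ofList l : List String).length : Int)
    have h1 := aloop_len l [] []
    have h2 := aloop_snd l [] []
    rw [PySem.Set.update_nil_left] at h2
    rw [h2] at h1
    simp only [List.length_nil, Nat.zero_add] at h1
    omega
  have keyB : number_of_duplicates_alt rd
      = (l.length : Int) - ((PySem.Set.ofList l : List String).length : Int) := by
    show (((vals.foldl (fun d fn => match fn with
        | none => d
        | some s => d.insert s (d.getD s 0 + 1)) PySem.Dict.empty) :
          PySem.Dict String Int).values).foldl (fun acc c => acc + (c - 1)) 0
      = (l.length : Int) - ((PySem.Set.ofList l : List String).length : Int)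
    rw [b_closed vals]
  rw [keyA, keyB]
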